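-- pv_equiv track=rewrite | github.com/limit5/OmniSight-Productizer | backend/tests/test_merger_agent.py | _simulate_submit_rule
-- ===== SOURCE A (Python) =====
-- AI_BOT_GROUP = {
--     "merger-agent-bot", "lint-bot", "security-bot", "ai-reviewer-x",
-- }
--
-- def _simulate_submit_rule(votes: list[tuple[str, int]]) -> str:
--     """Local analogue of the O7 submit-rule.
--
--     Rule: allow iff there is at least one Code-Review +2 from
--     ``merger-agent-bot`` AND at least one Code-Review +2 from an actor
--     NOT in the ``AI_BOT_GROUP``.  Otherwise reject with a stable code.
--     """
--     merger_plus2 = any(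
--         actor == "merger-agent-bot" and score == 2 for actor, score in votes
--     )
--     human_plus2 = any(
--         actor not in AI_BOT_GROUP and score == 2 for actor, score in votes
--     )
--     if merger_plus2 and human_plus2:
--         return "allow"
--     if not merger_plus2 and human_plus2:
--         return "reject_missing_merger"
--     return "reject_missing_human"
-- ===== SOURCE B (Python) =====
-- AI_BOT_GROUP = {
--     "merger-agent-bot", "lint-bot", "security-bot", "ai-reviewer-x",
-- }
--
-- _OUTCOME = (
--     "reject_missing_human",   # state 0: no merger +2, no non-bot +2
--     "reject_missing_human",   # state 1: merger +2 only
--     "reject_missing_merger",  # state 2: non-bot +2 only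
--     "allow",                  # state 3: both
-- )
--
-- def _simulate_submit_rule(votes):
--     """Single pass: fold the votes into a 2-bit state (bit 0 = merger +2 seen,
--     bit 1 = non-bot +2 seen), stop early once both bits are set, and read the
--     verdict from a lookup table indexed by the final state."""
--     state = 0
--     for actor, score in votes:
--         if score == 2:
--             if actor == "merger-agent-bot":
--                 state |= 1
--             elif actor not in AI_BOT_GROUP:
--                 state |= 2
--             if state == 3:
--                 break
--     return _OUTCOME[state]
-- ===== Notes on version B (the rewrite author's own statement) =====
-- stated objective: alternative
-- what changed: B replaces A's two full any-scans and three-way branch chain by a single-pass state machine: one loop folds each vote into a 2-bit state with early exit once both bits are set, and the verdict comes from a 4-entry lookup table indexed by the state.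
import Mathlib
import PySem

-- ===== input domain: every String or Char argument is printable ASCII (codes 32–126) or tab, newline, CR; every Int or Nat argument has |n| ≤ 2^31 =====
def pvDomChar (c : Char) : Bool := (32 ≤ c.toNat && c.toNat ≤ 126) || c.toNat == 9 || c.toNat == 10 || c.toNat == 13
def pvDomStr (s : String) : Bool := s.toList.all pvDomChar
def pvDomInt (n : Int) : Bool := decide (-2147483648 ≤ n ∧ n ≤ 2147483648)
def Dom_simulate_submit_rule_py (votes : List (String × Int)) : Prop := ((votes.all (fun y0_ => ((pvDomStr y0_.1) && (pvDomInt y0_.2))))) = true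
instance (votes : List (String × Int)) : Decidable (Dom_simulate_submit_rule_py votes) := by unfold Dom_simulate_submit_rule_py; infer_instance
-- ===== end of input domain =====

-- B is a single-pass state machine (2-bit state, early exit, 4-entry verdict table) instead of A's two any-scans plus branch chain; objective: alternative.

-- ===== PORT A =====
def pvAiBotGroup : List String := ["merger-agent-bot", "lint-bot", "security-bot", "ai-reviewer-x"]

def simulate_submit_rule_py (votes : List (String × Int)) : String :=
  let merger_plus2 := votes.any (fun p => p.1 == "merger-agent-bot" && p.2 == 2)
  let human_plus2 := votes.any (fun p => !(pvAiBotGroup.contains p.1) && p.2 == 2)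
  if merger_plus2 && human_plus2 then "allow"
  else if !merger_plus2 && human_plus2 then "reject_missing_merger"
  else "reject_missing_human"

-- ===== PORT B =====
-- the _OUTCOME tuple of Source B
def pvOutcome : List String :=
  ["reject_missing_human", "reject_missing_human", "reject_missing_merger", "allow"]

-- Source B's loop: fold the votes into the 2-bit state (Int.lor renders Python's `|=`),
-- breaking out as soon as state == 3
def pvScan : List (String × Int) → Int → Int
  | [], s => s
  | (actor, score) :: rest, s =>
    if score == 2 then
      let s' := if actor == "merger-agent-bot" then Int.lor s 1
                else if !(pvAiBotGroup.contains actor) then Int.lor s 2 else s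
      if s' == 3 then s' else pvScan rest s'
    else pvScan rest s

-- _OUTCOME[state]: pyGet? is exact for the tuple indexing; the state is always 0..3 so it
-- never misses and the getD default is never consulted (it only totalises the port)
def simulate_submit_rule_py_alt (votes : List (String × Int)) : String :=
  (PySem.List.pyGet? pvOutcome (pvScan votes 0)).getD "reject_missing_human"

-- ===== PRECONDITION & SPEC =====
def Spec_simulate_submit_rule_py (votes : List (String × Int)) (out : String) : Prop := out = simulate_submit_rule_py_alt votes
instance (votes : List (String × Int)) (out : String) : Decidable (Spec_simulate_submit_rule_py votes out) := by unfold Spec_simulate_submit_rule_py; infer_instance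

-- ===== CLAIM (what is proved, stated in full; the proofs are below) =====
def Claim_equal_simulate_submit_rule_py : Prop := ∀ (votes : List (String × Int)), Dom_simulate_submit_rule_py votes → Spec_simulate_submit_rule_py votes (simulate_submit_rule_py votes)

-- ===== LEMMAS AND PROOFS =====

-- Invariant of B's loop: starting from a state in {0,1,2,3}, the final state is the start
-- state or-ed with bit 0 = A's merger-scan flag and bit 1 = A's human-scan flag (the early
-- break at 3 is absorbed because 3 is the top of the 2-bit lattice).
theorem pvScan_eq (votes : List (String × Int)) :
    ∀ s : Int, (s = 0 ∨ s = 1 ∨ s = 2 ∨ s = 3) →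
    pvScan votes s =
      Int.lor (Int.lor s (if votes.any (fun p => p.1 == "merger-agent-bot" && p.2 == 2) then 1 else 0))
         (if votes.any (fun p => !(pvAiBotGroup.contains p.1) && p.2 == 2) then 2 else 0) := by
  induction votes with
  | nil => rintro s (rfl | rfl | rfl | rfl) <;> decide
  | cons hd rest ih =>
    rintro s hs
    obtain ⟨actor, score⟩ := hd
    by_cases hsc : score = 2
    · subst hsc
      by_cases ham : actor = "merger-agent-bot"
      · subst ham
        have hC : pvAiBotGroup.contains "merger-agent-bot" = true := by decide
        simp only [pvScan, List.any_cons, beq_self_eq_true, Bool.and_self, Bool.true_or,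
          if_true, hC, Bool.not_true, Bool.false_and, Bool.false_or]
        rcases hs with rfl | rfl | rfl | rfl
        · rw [show Int.lor (0:Int) 1 = (1:Int) from by decide, if_neg (by decide),
            ih 1 (by tauto)]
          cases rest.any (fun p => p.1 == "merger-agent-bot" && p.2 == 2) <;>
            cases rest.any (fun p => !(pvAiBotGroup.contains p.1) && p.2 == 2) <;> decide
        · rw [show Int.lor (1:Int) 1 = (1:Int) from by decide, if_neg (by decide),
            ih 1 (by tauto)]
          cases rest.any (fun p => p.1 == "merger-agent-bot" && p.2 == 2) <;>
            cases rest.any (fun p => !(pvAiBotGroup.contains p.1) && p.2 == 2) <;> decide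
        · rw [show Int.lor (2:Int) 1 = (3:Int) from by decide, if_pos (by decide)]
          cases rest.any (fun p => !(pvAiBotGroup.contains p.1) && p.2 == 2) <;> decide
        · rw [show Int.lor (3:Int) 1 = (3:Int) from by decide, if_pos (by decide)]
          cases rest.any (fun p => !(pvAiBotGroup.contains p.1) && p.2 == 2) <;> decide
      · have hm : (actor == "merger-agent-bot") = false := by simpa using ham
        by_cases hb : pvAiBotGroup.contains actor = true
        · simp only [pvScan, List.any_cons, hm, Bool.false_and, Bool.false_or, hb,
            Bool.not_true, Bool.false_eq_true, if_false, beq_self_eq_true, if_true]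
          rcases hs with rfl | rfl | rfl | rfl
          · rw [if_neg (by decide)]; exact ih _ (by tauto)
          · rw [if_neg (by decide)]; exact ih _ (by tauto)
          · rw [if_neg (by decide)]; exact ih _ (by tauto)
          · rw [if_pos (by decide)]
            cases rest.any (fun p => p.1 == "merger-agent-bot" && p.2 == 2) <;>
              cases rest.any (fun p => !(pvAiBotGroup.contains p.1) && p.2 == 2) <;> decide
        · have hb' : pvAiBotGroup.contains actor = false := by
            cases h : pvAiBotGroup.contains actor
            · rfl
            · exact absurd h hb
          simp only [pvScan, List.any_cons, hm, Bool.false_or, hb', Bool.not_false,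
            beq_self_eq_true, Bool.and_true, Bool.true_or, Bool.false_eq_true, if_false, if_true]
          rcases hs with rfl | rfl | rfl | rfl
          · rw [show Int.lor (0:Int) 2 = (2:Int) from by decide, if_neg (by decide),
              ih 2 (by tauto)]
            cases rest.any (fun p => p.1 == "merger-agent-bot" && p.2 == 2) <;>
              cases rest.any (fun p => !(pvAiBotGroup.contains p.1) && p.2 == 2) <;> decide
          · rw [show Int.lor (1:Int) 2 = (3:Int) from by decide, if_pos (by decide)]
            cases rest.any (fun p => p.1 == "merger-agent-bot" && p.2 == 2) <;> decide
          · rw [show Int.lor (2:Int) 2 = (2:Int) from by decide, if_neg (by decide),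
              ih 2 (by tauto)]
            cases rest.any (fun p => p.1 == "merger-agent-bot" && p.2 == 2) <;>
              cases rest.any (fun p => !(pvAiBotGroup.contains p.1) && p.2 == 2) <;> decide
          · rw [show Int.lor (3:Int) 2 = (3:Int) from by decide, if_pos (by decide)]
            cases rest.any (fun p => p.1 == "merger-agent-bot" && p.2 == 2) <;> decide
    · have h2 : (score == 2) = false := by simpa using hsc
      simp only [pvScan, List.any_cons, h2, Bool.and_false, Bool.false_or, Bool.false_eq_true,
        if_false]
      exact ih s hs

-- ===== VERDICT (by name: the statement is the Claim_ definition above) =====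
theorem simulate_submit_rule_py_spec : Claim_equal_simulate_submit_rule_py := by
  intro votes _
  unfold Spec_simulate_submit_rule_py simulate_submit_rule_py simulate_submit_rule_py_alt
  rw [pvScan_eq votes 0 (Or.inl rfl)]
  cases votes.any (fun p => p.1 == "merger-agent-bot" && p.2 == 2) <;>
    cases votes.any (fun p => !(pvAiBotGroup.contains p.1) && p.2 == 2) <;> decide
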